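-- pv_equiv track=rewrite | github.com/kmccleary3301/memory_caching | src/memory_caching/segmentation.py | logarithmic_segments
-- ===== SOURCE A (Python) =====
-- def logarithmic_segments(length: int) -> list[int]:
--     if length <= 0:
--         return []
--
--     result: list[int] = []
--     remaining = length
--     power = 1
--     while power * 2 <= remaining:
--         power *= 2
--
--     while remaining > 0:
--         while power > remaining:
--             power //= 2
--         result.append(power)
--         remaining -= power
--     return result
-- ===== SOURCE B (Python) =====
-- def logarithmic_segments(length: int) -> list[int]:
--     if length <= 0:
--         return []
--     out: list[int] = []
--     for i in reversed(range(length.bit_length())):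
--         if (length >> i) & 1:
--             out.append(1 << i)
--     return out
-- ===== Notes on version B (the rewrite author's own statement) =====
-- stated objective: idiomatic
-- what changed: B reads the binary representation directly (bit_length and shift/mask per bit position, descending) instead of A's remaining/power state machine with a growing loop, an inner halving loop and repeated subtraction.
import Mathlib
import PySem

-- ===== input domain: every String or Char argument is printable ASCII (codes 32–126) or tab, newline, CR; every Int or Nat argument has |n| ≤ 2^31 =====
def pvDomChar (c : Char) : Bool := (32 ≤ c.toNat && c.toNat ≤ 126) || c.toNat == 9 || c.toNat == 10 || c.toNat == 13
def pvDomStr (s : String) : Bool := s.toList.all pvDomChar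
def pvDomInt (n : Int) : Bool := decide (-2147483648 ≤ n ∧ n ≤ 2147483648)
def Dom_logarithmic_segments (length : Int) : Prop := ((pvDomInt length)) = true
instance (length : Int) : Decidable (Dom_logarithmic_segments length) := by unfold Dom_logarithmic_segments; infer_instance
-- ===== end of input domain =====

-- B reads the binary representation directly (bit positions, descending) instead of A's
-- remaining/power subtraction loops; objective: more idiomatic, same results.

-- ===== PORT A =====
-- After the `length <= 0` guard the Python loop state (remaining, power) stays nonnegative,
-- so the helpers carry it as Nat; `power //= 2` on a nonnegative int is Nat division.

-- `while power * 2 <= remaining: power *= 2`  (the 0 < power conjunct is a termination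
-- guard only: growA is always entered with power ≥ 1 and doubling preserves that)
def growA (remaining power : Nat) : Nat :=
  if _h : 0 < power ∧ power * 2 ≤ remaining then growA remaining (power * 2) else power
termination_by remaining - power
decreasing_by omega

-- `while power > remaining: power //= 2`
def shrinkA (remaining power : Nat) : Nat :=
  if _h : power > remaining then shrinkA remaining (power / 2) else power
termination_by power
decreasing_by exact Nat.div_lt_self (by omega) (by omega)

-- termination helper for loopA (cited in its decreasing_by)
theorem shrinkA_pos (remaining power : Nat) (hr : 0 < remaining) (hp : 0 < power) :
    0 < shrinkA remaining power := by
  rw [shrinkA]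
  split
  · exact shrinkA_pos remaining (power / 2) hr (by omega)
  · exact hp
termination_by power
decreasing_by exact Nat.div_lt_self (by omega) (by omega)

-- `while remaining > 0: (inner while) ; result.append(power); remaining -= power`
-- (the 0 < power conjunct is a termination guard only: it is always entered with power ≥ 1)
def loopA (remaining power : Nat) : List Int :=
  if h : 0 < remaining ∧ 0 < power then
    let p := shrinkA remaining power
    (p : Int) :: loopA (remaining - p) p
  else []
termination_by remaining
decreasing_by
  have := shrinkA_pos remaining power h.1 h.2
  omega

def logarithmic_segments (length : Int) : List Int :=
  if length ≤ 0 then []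
  else loopA length.toNat (growA length.toNat 1)

-- ===== PORT B =====
-- `length.bit_length()`
def bitLen (n : Nat) : Nat :=
  if n = 0 then 0 else bitLen (n / 2) + 1
termination_by n
decreasing_by omega

-- `(length >> i) & 1` is `Nat.testBit`, `1 << i` is `2 ^ i`
def logarithmic_segments_alt (length : Int) : List Int :=
  if length ≤ 0 then []
  else
    (List.range (bitLen length.toNat)).reverse.foldl
      (fun out i => if length.toNat.testBit i then out ++ [((2 : Int) ^ i)] else out) []

-- ===== PRECONDITION & SPEC =====
def Spec_logarithmic_segments (length : Int) (out : List Int) : Prop := out = logarithmic_segments_alt length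
instance (length : Int) (out : List Int) : Decidable (Spec_logarithmic_segments length out) := by unfold Spec_logarithmic_segments; infer_instance

-- ===== CLAIM (what is proved, stated in full; the proofs are below) =====
def Claim_equal_logarithmic_segments : Prop := ∀ (length : Int), Dom_logarithmic_segments length → Spec_logarithmic_segments length (logarithmic_segments length)

-- ===== LEMMAS AND PROOFS =====

-- descending bit read, as a recursion on the highest considered position
def bitsRec : Nat → Nat → List Int
  | 0, _ => []
  | k + 1, r => (if r.testBit k then [((2 : Int) ^ k)] else []) ++ bitsRec k r

theorem bitsRec_zero (k : Nat) : bitsRec k 0 = [] := by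
  induction k with
  | zero => rfl
  | succ k ih => simp [bitsRec, ih]

-- B's fold over reversed(range k) is bitsRec k
theorem fold_eq_bitsRec (r : Nat) (k : Nat) :
    (List.range k).reverse.foldl
      (fun out i => if r.testBit i then out ++ [((2 : Int) ^ i)] else out) [] = bitsRec k r := by
  induction k with
  | zero => rfl
  | succ k ih =>
      rw [List.range_succ, List.reverse_append]
      simp only [List.reverse_singleton, List.singleton_append, List.foldl_cons]
      rw [PySem.List.foldl_append_if (p := r.testBit) (f := fun i => (2 : Int) ^ i)] at ih ⊢
      simp only [List.nil_append] at ih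
      rw [ih, bitsRec]
      cases h : r.testBit k <;> simp [h, bitsRec]

theorem bitsRec_congr (t : Nat) (r s : Nat) (h : ∀ i, i < t → r.testBit i = s.testBit i) :
    bitsRec t r = bitsRec t s := by
  induction t with
  | zero => rfl
  | succ t ih =>
      simp only [bitsRec, h t (by omega), ih (fun i hi => h i (by omega))]

theorem testBit_top {r m : Nat} (h1 : 2 ^ m ≤ r) (h2 : r < 2 * 2 ^ m) : r.testBit m = true := by
  have hx : r = 2 ^ m + (r - 2 ^ m) := by omega
  rw [hx, Nat.testBit_two_pow_add_eq,
      Nat.testBit_eq_false_of_lt (show r - 2 ^ m < 2 ^ m by omega)]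
  rfl

theorem testBit_sub_low {r m i : Nat} (h1 : 2 ^ m ≤ r) (hi : i < m) :
    (r - 2 ^ m).testBit i = r.testBit i := by
  have hx : r = 2 ^ m + (r - 2 ^ m) := by omega
  conv_rhs => rw [hx]
  rw [Nat.testBit_two_pow_add_gt hi]

-- the shrink loop lands on the highest set bit
theorem shrink_spec (k : Nat) : ∀ r, 0 < r → r < 2 * 2 ^ k →
    ∃ m, shrinkA r (2 ^ k) = 2 ^ m ∧ 2 ^ m ≤ r ∧ r < 2 * 2 ^ m := by
  induction k with
  | zero =>
      intro r hr hlt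
      refine ⟨0, ?_, by simpa using hr, by simpa using hlt⟩
      rw [shrinkA]
      simp
      omega
  | succ k ih =>
      intro r hr hlt
      rw [shrinkA]
      split
      · have hhalf : 2 ^ (k + 1) / 2 = 2 ^ k := by
          rw [Nat.pow_succ]
          omega
        rw [hhalf]
        exact ih r hr (by omega)
      · exact ⟨k + 1, rfl, by omega, hlt⟩

-- the grow loop reaches a power of two p with r < 2p
theorem grow_spec (r p : Nat) (j : Nat) (hp : p = 2 ^ j) :
    ∃ k, growA r p = 2 ^ k ∧ r < 2 * 2 ^ k := by
  rw [growA]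
  split
  · subst hp
    have : 2 ^ j * 2 = 2 ^ (j + 1) := by rw [Nat.pow_succ]
    rw [this] at *
    exact grow_spec r (2 ^ (j + 1)) (j + 1) rfl
  · rename_i h
    subst hp
    refine ⟨j, rfl, ?_⟩
    have hpos : 0 < 2 ^ j := Nat.two_pow_pos j
    omega
termination_by r - p
decreasing_by
  rename_i h
  omega

theorem bitsRec_drop (a : Nat) : ∀ b r, b ≤ a → r < 2 ^ b → bitsRec a r = bitsRec b r := by
  induction a with
  | zero => intro b r hb _; interval_cases b; rfl
  | succ a ih =>
      intro b r hb hr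
      rcases Nat.eq_or_lt_of_le hb with h | h
      · rw [h]
      · have hlt : r < 2 ^ a := lt_of_lt_of_le hr (Nat.pow_le_pow_right (by omega) (by omega))
        rw [bitsRec, Nat.testBit_eq_false_of_lt hlt]
        simpa using ih b r (by omega) hr

theorem loopA_eq_bitsRec (r : Nat) : ∀ k, r < 2 * 2 ^ k → loopA r (2 ^ k) = bitsRec (k + 1) r := by
  induction r using Nat.strong_induction_on with
  | _ r IH =>
      intro k hk
      rw [loopA]
      by_cases hr : 0 < r
      · rw [dif_pos ⟨hr, Nat.two_pow_pos k⟩]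
        obtain ⟨m, hsm, hle, hlt⟩ := shrink_spec k r hr hk
        have hmpos : 0 < 2 ^ m := Nat.two_pow_pos m
        have hmk : m ≤ k := by
          by_contra hmk
          have : 2 * 2 ^ k ≤ 2 ^ m := by
            calc 2 * 2 ^ k = 2 ^ (k + 1) := by rw [Nat.pow_succ]; ring
              _ ≤ 2 ^ m := Nat.pow_le_pow_right (by omega) (by omega)
          omega
        have hxlt : r - 2 ^ m < 2 ^ m := by omega
        have hrec : loopA (r - 2 ^ m) (2 ^ m) = bitsRec (m + 1) (r - 2 ^ m) :=
          IH (r - 2 ^ m) (by omega) m (by omega)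
        simp only [hsm, hrec]
        -- right-hand side: peel unset bits above m, the set bit at m, equal low bits
        have hdrop : bitsRec (k + 1) r = bitsRec (m + 1) r :=
          bitsRec_drop (k + 1) (m + 1) r (by omega)
            (by calc r < 2 * 2 ^ m := hlt
                  _ = 2 ^ (m + 1) := by rw [Nat.pow_succ]; ring)
        have hxdrop : bitsRec (m + 1) (r - 2 ^ m) = bitsRec m (r - 2 ^ m) := by
          rw [bitsRec, Nat.testBit_eq_false_of_lt hxlt]
          simp
        have hlow : bitsRec m r = bitsRec m (r - 2 ^ m) :=
          (bitsRec_congr m r (r - 2 ^ m)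
            (fun i hi => (testBit_sub_low hle hi).symm))
        rw [hxdrop, ← hlow, hdrop, bitsRec, testBit_top hle hlt]
        simp
      · have : r = 0 := by omega
        subst this
        rw [dif_neg (by omega), bitsRec_zero]

theorem lt_two_pow_bitLen (r : Nat) : r < 2 ^ bitLen r := by
  induction r using Nat.strong_induction_on with
  | _ r IH =>
      rw [bitLen]
      split
      · omega
      · rename_i h
        have := IH (r / 2) (by omega)
        rw [Nat.pow_succ]
        omega

theorem bitLen_le (t : Nat) : ∀ r, r < 2 ^ t → bitLen r ≤ t := by
  induction t with
  | zero =>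
      intro r hr
      have : r = 0 := by omega
      subst this
      rw [bitLen]
      simp
  | succ t ih =>
      intro r hr
      rw [bitLen]
      split
      · omega
      · rename_i h
        have : r / 2 < 2 ^ t := by
          rw [Nat.pow_succ] at hr
          omega
        exact Nat.succ_le_succ (ih (r / 2) this)

-- ===== VERDICT (by name: the statement is the Claim_ definition above) =====
theorem logarithmic_segments_spec : Claim_equal_logarithmic_segments := by
  intro length _
  unfold Spec_logarithmic_segments logarithmic_segments logarithmic_segments_alt
  by_cases h : length ≤ 0
  · simp [h]
  · rw [if_neg h, if_neg h]
    set r := length.toNat with hr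
    have hrpos : 0 < r := by omega
    obtain ⟨k, hg, hk⟩ := grow_spec r 1 0 (by norm_num)
    rw [hg, loopA_eq_bitsRec r k hk, fold_eq_bitsRec]
    exact bitsRec_drop (k + 1) (bitLen r) r
      (by
        have h1 : r < 2 ^ (k + 1) := by rw [Nat.pow_succ]; omega
        exact bitLen_le (k + 1) r h1)
      (lt_two_pow_bitLen r)
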